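-- pv_equiv track=rewrite | github.com/danilka4/chairdelure | test/expirements.py | get_cases
-- ===== SOURCE A (Python) =====
-- def get_cases(data):
--     cases = []
--     for message in data:
--         words = message.split()
--         for i in range(1, len(words)):
--             context = " ".join(words[:i])
--             word = words[i]
--             cases.append((context, word))
--     return cases
-- ===== SOURCE B (Python) =====
-- def get_cases(data):
--     cases = []
--     for message in data:
--         words = message.split()
--         if len(words) >= 2:
--             context = words[0]
--             for word in words[1:]:
--                 cases.append((context, word))
--                 context = context + " " + word
--     return cases
-- ===== Notes on version B (the rewrite author's own statement) =====
-- stated objective: simpler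
-- what changed: Replaces the per-index re-join of the growing prefix (words[:i] joined each step) by a single pass that carries an incremental context accumulator, extending it with one word at a time.
import Mathlib
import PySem

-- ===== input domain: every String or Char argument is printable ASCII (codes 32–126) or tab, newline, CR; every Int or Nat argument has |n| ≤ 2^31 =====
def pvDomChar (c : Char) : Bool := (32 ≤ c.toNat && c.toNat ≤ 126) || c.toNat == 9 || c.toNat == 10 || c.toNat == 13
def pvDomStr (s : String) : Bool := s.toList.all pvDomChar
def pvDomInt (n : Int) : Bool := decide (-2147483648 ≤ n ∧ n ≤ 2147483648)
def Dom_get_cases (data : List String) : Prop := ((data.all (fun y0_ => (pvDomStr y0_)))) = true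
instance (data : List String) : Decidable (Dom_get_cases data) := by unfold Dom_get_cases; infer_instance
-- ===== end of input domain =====

-- B builds each message's (context, next-word) pairs in one pass with an incremental
-- context accumulator instead of A's per-index re-join of the prefix slice (objective: simpler).

-- ===== PORT A =====
-- 'words[i]' with i drawn from range(1, len(words)) is always in range, so pyGetD's default is never used.
def get_cases (data : List String) : List (String × String) :=
  data.foldl (fun cases message =>
    let words := PySem.Str.split₀ message
    (PySem.List.pyRange 1 (words.length : Int) 1).foldl (fun cases i =>
      let context := PySem.Str.join " " (PySem.List.slice words none (some i))
      let word := PySem.List.pyGetD words i ""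
      cases ++ [(context, word)]) cases) []

-- ===== PORT B =====
-- the inner 'for word in words[1:]' loop of Source B, carrying the growing context
def pvPairs (context : String) : List String → List (String × String)
  | [] => []
  | w :: ws => (context, w) :: pvPairs (context ++ " " ++ w) ws

def get_cases_alt (data : List String) : List (String × String) :=
  data.foldl (fun cases message =>
    match PySem.Str.split₀ message with
    | c :: w :: ws => cases ++ pvPairs c (w :: ws)
    | _ => cases) []

-- ===== PRECONDITION & SPEC =====
def Spec_get_cases (data : List String) (out : List (String × String)) : Prop := out = get_cases_alt data
instance (data : List String) (out : List (String × String)) : Decidable (Spec_get_cases data out) := by unfold Spec_get_cases; infer_instance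

-- ===== CLAIM (what is proved, stated in full; the proofs are below) =====
def Claim_equal_get_cases : Prop := ∀ (data : List String), Dom_get_cases data → Spec_get_cases data (get_cases data)

-- ===== LEMMAS AND PROOFS =====

theorem pvStr_ext {s t : String} (h : s.toList = t.toList) : s = t := by
  have := congrArg String.ofList h
  simpa using this

theorem pvCharsJoin_snoc (sep w : List Char) :
    ∀ (p : List (List Char)), p ≠ [] →
      PySem.Chars.join sep (p ++ [w]) = PySem.Chars.join sep p ++ sep ++ w
  | [], h => absurd rfl h
  | [a], _ => by
      rw [List.singleton_append, PySem.Chars.join_cons_cons, PySem.Chars.join_singleton,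
        PySem.Chars.join_singleton]
  | a :: b :: rest, _ => by
      have ih : PySem.Chars.join sep (b :: (rest ++ [w]))
          = PySem.Chars.join sep (b :: rest) ++ sep ++ w := by
        simpa using pvCharsJoin_snoc sep w (b :: rest) (by simp)
      rw [List.cons_append, PySem.Chars.join_cons_cons, List.cons_append,
        PySem.Chars.join_cons_cons, ih]
      simp [List.append_assoc]

theorem pvStrJoin_snoc (p : List String) (hp : p ≠ []) (w : String) :
    PySem.Str.join " " (p ++ [w]) = PySem.Str.join " " p ++ " " ++ w := by
  apply pvStr_ext
  have hmap : (p.map String.toList) ≠ [] := by simpa using hp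
  simp only [PySem.Str.toList_join, List.map_append, List.map_cons, List.map_nil,
    String.toList_append]
  rw [pvCharsJoin_snoc _ _ _ hmap]

theorem pvStrJoin_singleton (c : String) : PySem.Str.join " " [c] = c := by
  apply pvStr_ext
  simp [PySem.Str.toList_join, PySem.Chars.join_singleton]

theorem pvMap_eq_pvPairs :
    ∀ (rest p : List String), p ≠ [] →
      (PySem.List.pyRange (p.length : Int) ((p.length : Int) + (rest.length : Int)) 1).map
        (fun i => (PySem.Str.join " " (PySem.List.slice (p ++ rest) none (some i)),
                   PySem.List.pyGetD (p ++ rest) i ""))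
      = pvPairs (PySem.Str.join " " p) rest
  | [], p, _ => by
      rw [PySem.List.pyRange_one_eq_nil (by simp)]
      simp [pvPairs]
  | w :: rs, p, hp => by
      have hlt : (p.length : Int) < (p.length : Int) + ((w :: rs).length : Int) := by
        simp
      rw [PySem.List.pyRange_one_cons hlt, List.map_cons]
      have hhead : (PySem.Str.join " " (PySem.List.slice (p ++ w :: rs) none (some (p.length : Int))),
          PySem.List.pyGetD (p ++ w :: rs) (p.length : Int) "")
          = (PySem.Str.join " " p, w) := by
        rw [PySem.List.slice_to_natCast, List.take_left, PySem.List.pyGetD_natCast]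
        simp [List.getD]
      have harg1 : (p.length : Int) + 1 = (((p ++ [w]).length : Nat) : Int) := by
        simp
      have harg2 : (p.length : Int) + ((w :: rs).length : Int)
          = (((p ++ [w]).length : Nat) : Int) + (rs.length : Int) := by
        simp; omega
      have hlist : p ++ w :: rs = (p ++ [w]) ++ rs := by simp
      rw [hhead, harg1, harg2, hlist,
        pvMap_eq_pvPairs rs (p ++ [w]) (by simp),
        pvStrJoin_snoc p hp w]
      rfl

theorem pvInnerA (ws : List String) (cases : List (String × String)) :
    (PySem.List.pyRange 1 (ws.length : Int) 1).foldl (fun cases i =>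
        cases ++ [(PySem.Str.join " " (PySem.List.slice ws none (some i)),
                   PySem.List.pyGetD ws i "")]) cases
    = cases ++ (match ws with
        | c :: w :: rest => pvPairs c (w :: rest)
        | _ => []) := by
  rw [PySem.List.foldl_append_singleton_eq_map]
  match ws with
  | [] => rw [PySem.List.pyRange_one_eq_nil (by simp)]; simp
  | [c] => rw [PySem.List.pyRange_one_eq_nil (by simp)]; simp
  | c :: w :: rest =>
      congr 1
      have h := pvMap_eq_pvPairs (w :: rest) [c] (by simp)
      simp only [List.length_cons, List.length_nil, Nat.cast_one, List.singleton_append,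
        Nat.cast_add, pvStrJoin_singleton] at h ⊢
      convert h using 3
      push_cast; ring

-- ===== VERDICT (by name: the statement is the Claim_ definition above) =====
theorem get_cases_spec : Claim_equal_get_cases := by
  intro data _
  unfold Spec_get_cases get_cases get_cases_alt
  apply PySem.List.foldl_congr_mem
  intro acc m _
  simp only []
  rw [pvInnerA]
  rcases PySem.Str.split₀ m with _ | ⟨c, _ | ⟨w, ws⟩⟩ <;> simp
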